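-- pv_equiv track=rewrite | github.com/sahilkhasnobish/University-Projects | CP-164/Lab6.py | get_positives2
-- ===== SOURCE A (Python) =====
-- def get_positives2(list1):
--     """
--     -------------------------------------------------------
--     Description:
--         Construct a list of positive numbers in list1
--         Uses Recursion
--     Assert: 'list1' is of type list
--             you do not need to assert that list1 items are numbers
--     Use: pos_list = get_positives2(input_list):
--     -------------------------------------------------------
--     Parameters:
--         list1: list containing numbers (list)
--     Returns:
--         pos_list: list containing positive numbers from list1 (list)
--     -------------------------------------------------------
--     """
--     assert isinstance(list1, list)
--     if list1 == []:
--         return []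
--     if list1[-1] > 0:
--         pos_list = get_positives2(list1[:-1]) + [list1[-1]]
--     else:
--         pos_list = get_positives2(list1[:-1])
--
--     return pos_list
-- ===== SOURCE B (Python) =====
-- def get_positives2(list1):
--     assert isinstance(list1, list)
--     pos_list = []
--     for x in list1:
--         if x > 0:
--             pos_list.append(x)
--     return pos_list
-- ===== Notes on version B (the rewrite author's own statement) =====
-- stated objective: simpler
-- what changed: Replaced the end-peeling recursion (list1[:-1] slice per element) with a single forward iterative pass appending to an accumulator.
import Mathlib
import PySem

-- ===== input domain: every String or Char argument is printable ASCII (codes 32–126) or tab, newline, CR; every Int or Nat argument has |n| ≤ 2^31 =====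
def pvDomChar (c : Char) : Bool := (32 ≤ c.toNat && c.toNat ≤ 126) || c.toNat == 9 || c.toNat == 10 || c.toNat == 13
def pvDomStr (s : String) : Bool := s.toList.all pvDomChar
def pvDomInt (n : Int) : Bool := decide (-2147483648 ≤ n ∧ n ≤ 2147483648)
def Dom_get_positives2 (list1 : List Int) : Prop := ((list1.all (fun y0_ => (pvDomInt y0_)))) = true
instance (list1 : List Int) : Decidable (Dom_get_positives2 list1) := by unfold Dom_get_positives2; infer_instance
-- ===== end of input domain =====

-- B replaces A's end-peeling recursion by a single forward pass with an accumulator (simpler).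

-- ===== PORT A =====
-- A recurses on list1[:-1] and inspects list1[-1]; ported with dropLast / getLast!
-- (exact here since the nonempty branch guarantees a last element exists).
def get_positives2 (list1 : List Int) : List Int :=
  if list1 = [] then []
  else if list1.getLast! > 0 then get_positives2 list1.dropLast ++ [list1.getLast!]
  else get_positives2 list1.dropLast
termination_by list1.length
decreasing_by
  all_goals
    have h : list1.length ≠ 0 := by
      simpa [List.length_eq_zero_iff] using ‹¬ list1 = []›
    simp [List.length_dropLast]
    omega

-- ===== PORT B =====
def get_positives2_alt (list1 : List Int) : List Int :=
  list1.foldl (fun pos_list x => if x > 0 then pos_list ++ [x] else pos_list) []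

-- ===== PRECONDITION & SPEC =====
def Spec_get_positives2 (list1 : List Int) (out : List Int) : Prop := out = get_positives2_alt list1
instance (list1 : List Int) (out : List Int) : Decidable (Spec_get_positives2 list1 out) := by unfold Spec_get_positives2; infer_instance

-- ===== CLAIM (what is proved, stated in full; the proofs are below) =====
def Claim_equal_get_positives2 : Prop := ∀ (list1 : List Int), Dom_get_positives2 list1 → Spec_get_positives2 list1 (get_positives2 list1)

-- ===== LEMMAS AND PROOFS =====

theorem getA_snoc (l : List Int) (a : Int) :
    get_positives2 (l ++ [a]) =
      if a > 0 then get_positives2 l ++ [a] else get_positives2 l := by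
  rw [get_positives2]
  simp

theorem foldl_acc (l : List Int) (acc : List Int) :
    l.foldl (fun pos_list x => if x > 0 then pos_list ++ [x] else pos_list) acc
      = acc ++ l.foldl (fun pos_list x => if x > 0 then pos_list ++ [x] else pos_list) [] := by
  induction l generalizing acc with
  | nil => simp
  | cons x xs ih =>
    simp only [List.foldl_cons]
    rw [ih, ih (if x > 0 then ([] : List Int) ++ [x] else [])]
    split_ifs <;> simp

theorem getAB (l : List Int) : get_positives2 l = get_positives2_alt l := by
  induction l using List.reverseRecOn with
  | nil => rw [get_positives2]; rfl
  | append_singleton xs a ih =>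
    rw [getA_snoc, ih]
    unfold get_positives2_alt
    rw [List.foldl_append, foldl_acc]
    split_ifs <;> simp <;> omega

-- ===== VERDICT (by name: the statement is the Claim_ definition above) =====
theorem get_positives2_spec : Claim_equal_get_positives2 := by
  intro l _
  exact getAB l
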